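-- pv_equiv track=rewrite | github.com/Datamuseum-DK/AutoArchaeologist | autoarchaeologist/vendor/zilog/mcz_floppy.py | repr_prop
-- ===== SOURCE A (Python) =====
-- def repr_prop(x):
--     ''' Text representation of the property field '''
--
--     l = []
--     for n, c in enumerate("WELSRF21"):
--         if x & (0x80 >> n):
--             l.append(c)
--         else:
--             l.append('-')
--     return "".join(l)
-- ===== SOURCE B (Python) =====
-- def repr_prop(x):
--     ''' Text representation of the property field '''
--
--     bits = format(x & 0xFF, '08b')
--     return "".join(c if b == '1' else '-' for b, c in zip(bits, "WELSRF21"))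
-- ===== Notes on version B (the rewrite author's own statement) =====
-- stated objective: idiomatic
-- what changed: B renders the whole low byte once as an 8-character binary string (format(x & 0xFF, '08b')) and zips it against the label string, emitting label-or-dash per bit character, instead of A's explicit loop testing a shifted bitmask 0x80 >> n per position.
import Mathlib
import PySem

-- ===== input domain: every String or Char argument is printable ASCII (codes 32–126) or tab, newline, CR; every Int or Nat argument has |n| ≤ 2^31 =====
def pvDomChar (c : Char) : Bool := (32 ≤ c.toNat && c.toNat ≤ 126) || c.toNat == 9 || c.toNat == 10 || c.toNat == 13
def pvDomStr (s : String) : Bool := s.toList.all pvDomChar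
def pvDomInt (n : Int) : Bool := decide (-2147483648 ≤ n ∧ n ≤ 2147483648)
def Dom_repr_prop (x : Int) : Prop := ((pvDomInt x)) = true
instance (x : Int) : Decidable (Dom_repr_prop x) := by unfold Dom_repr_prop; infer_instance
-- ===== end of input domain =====

-- B formats the low byte once as an 8-char binary string and zips it with the label string
-- instead of A's per-position shifted-bitmask test (idiomatic decomposition; same result).

-- ===== PORT A =====
-- Python: l = []; for n, c in enumerate("WELSRF21"): append c if x & (0x80 >> n) else '-'; "".join(l)
-- (n from enumerate is always ≥ 0, so `.toNat` on it is exact for the shift amount)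
def repr_prop (x : Int) : String :=
  let l := (PySem.List.enumerate "WELSRF21".toList).foldl
    (fun acc nc =>
      if PySem.Int.band x ((128 : Int) >>> nc.1.toNat) ≠ 0 then acc ++ [nc.2]
      else acc ++ ['-']) []
  String.mk l

-- ===== PORT B =====
-- Python: bits = format(x & 0xFF, '08b'); join(c if b == '1' else '-' for b, c in zip(bits, "WELSRF21"))
-- format(y, '08b') for 0 ≤ y < 256 is ported bit-exactly as the 8 binary digit characters of y.
def repr_prop_alt (x : Int) : String :=
  let y := (PySem.Int.band x 255).toNat
  let bits := (List.range 8).map (fun i => if y.testBit (7 - i) then '1' else '0')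
  String.mk ((bits.zip "WELSRF21".toList).map (fun bc => if bc.1 = '1' then bc.2 else '-'))

-- ===== PRECONDITION & SPEC =====
def Spec_repr_prop (x : Int) (out : String) : Prop := out = repr_prop_alt x
instance (x : Int) (out : String) : Decidable (Spec_repr_prop x out) := by unfold Spec_repr_prop; infer_instance

-- ===== CLAIM (what is proved, stated in full; the proofs are below) =====
def Claim_equal_repr_prop : Prop := ∀ (x : Int), Dom_repr_prop x → Spec_repr_prop x (repr_prop x)

-- ===== LEMMAS AND PROOFS =====
lemma and255 (n : Nat) : 255 &&& n = n % 256 := by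
  have := Nat.and_two_pow_sub_one_eq_mod n 8
  rw [Nat.and_comm]
  norm_num at this
  simpa using this

set_option maxRecDepth 8192 in
lemma compl8 : ∀ m < 256, ∀ k < 8, (255 - m).testBit k = !(Nat.testBit m k) := by decide

-- Python truthiness of `x & (0x80 >> n)` read off the bits of `x & 0xFF`
lemma bit_iff (x : Int) (k : Nat) (hk : k < 8) :
    (PySem.Int.band x ((2:Int)^k) ≠ 0) ↔ ((PySem.Int.band x 255).toNat.testBit k = true) := by
  have h2k : ((2:Int)^k) = ((2^k : Nat) : Int) := by push_cast; ring
  have hmask : (0:Int) ≤ 2^k := by positivity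
  rcases (show 0 ≤ x ∨ x < 0 by omega) with hx | hx
  · rw [show x = ((x.toNat : Nat) : Int) from (Int.toNat_of_nonneg hx).symm, h2k,
        show (255 : Int) = ((255:Nat):Int) from rfl,
        PySem.Int.band_natCast, PySem.Int.band_natCast, Int.toNat_natCast,
        show x.toNat &&& 255 = x.toNat % 256 from by rw [Nat.and_comm]; exact and255 _,
        show (256:Nat) = 2^8 from rfl, Nat.testBit_mod_two_pow]
    simp [Nat.and_two_pow, hk]
  · have hx2 : ¬ (0 ≤ x) := by omega
    set m := (-x-1).toNat with hm
    have hb1 : PySem.Int.band x ((2:Int)^k) = ((2^k - (2^k &&& m) : Nat) : Int) := by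
      simp only [PySem.Int.band, if_neg hx2, if_pos hmask]
      rw [show ((2:Int)^k).toNat = 2^k by rw [h2k, Int.toNat_natCast]]
    have hb2 : PySem.Int.band x 255 = ((255 - (255 &&& m) : Nat) : Int) := by
      simp only [PySem.Int.band, if_neg hx2, if_pos (by norm_num : (0:Int) ≤ 255)]
      norm_num
      simp [show (-x).toNat - 1 = m by omega]
    rw [hb1, hb2, Int.toNat_natCast, and255, compl8 (m % 256) (Nat.mod_lt _ (by norm_num)) k hk,
        show (256:Nat) = 2^8 from rfl, Nat.testBit_mod_two_pow]
    rw [Nat.and_comm]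
    simp [Nat.and_two_pow, hk]
    cases h : m.testBit k
    · simp [h]
    · simp [h]

-- Python's x & 0xFF is the low byte, i.e. x mod 256
lemma band255 (x : Int) : PySem.Int.band x 255 = x % 256 := by
  rcases (show 0 ≤ x ∨ x < 0 by omega) with hx | hx
  · rw [show x = ((x.toNat:Nat):Int) from (Int.toNat_of_nonneg hx).symm,
        show (255:Int) = ((255:Nat):Int) from rfl, PySem.Int.band_natCast,
        show x.toNat &&& 255 = x.toNat % 256 from by rw [Nat.and_comm]; exact and255 _]
    omega
  · have hx2 : ¬ (0 ≤ x) := by omega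
    simp only [PySem.Int.band, if_neg hx2, if_pos (by norm_num : (0:Int) ≤ 255)]
    norm_num
    rw [show (255:Int).toNat = 255 from rfl, and255]
    omega

lemma bandlow_ne_iff (x : Int) (k : Nat) (hk : k < 8) :
    (PySem.Int.band x ((2:Int)^k) ≠ 0) ↔ (PySem.Int.band (x % 256) ((2:Int)^k) ≠ 0) := by
  rw [bit_iff x k hk, bit_iff (x % 256) k hk, band255, band255,
      show (x % 256) % 256 = x % 256 by omega]

lemma hA (x : Int) : repr_prop x = repr_prop (x % 256) := by
  simp only [repr_prop]
  rw [show PySem.List.enumerate "WELSRF21".toList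
      = [((0:Int),'W'),(1,'E'),(2,'L'),(3,'S'),(4,'R'),(5,'F'),(6,'2'),(7,'1')] from rfl]
  refine congrArg String.mk (PySem.List.foldl_congr_mem _ _ _ _ ?_)
  intro acc nc hmem
  fin_cases hmem
  · exact if_congr (by rw [show ((128:Int) >>> ((Int.toNat (((0:Int),'W').1) : Nat) : Int)) = 2^7 from by decide]; exact bandlow_ne_iff x 7 (by norm_num)) rfl rfl
  · exact if_congr (by rw [show ((128:Int) >>> ((Int.toNat (((1:Int),'E').1) : Nat) : Int)) = 2^6 from by decide]; exact bandlow_ne_iff x 6 (by norm_num)) rfl rfl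
  · exact if_congr (by rw [show ((128:Int) >>> ((Int.toNat (((2:Int),'L').1) : Nat) : Int)) = 2^5 from by decide]; exact bandlow_ne_iff x 5 (by norm_num)) rfl rfl
  · exact if_congr (by rw [show ((128:Int) >>> ((Int.toNat (((3:Int),'S').1) : Nat) : Int)) = 2^4 from by decide]; exact bandlow_ne_iff x 4 (by norm_num)) rfl rfl
  · exact if_congr (by rw [show ((128:Int) >>> ((Int.toNat (((4:Int),'R').1) : Nat) : Int)) = 2^3 from by decide]; exact bandlow_ne_iff x 3 (by norm_num)) rfl rfl
  · exact if_congr (by rw [show ((128:Int) >>> ((Int.toNat (((5:Int),'F').1) : Nat) : Int)) = 2^2 from by decide]; exact bandlow_ne_iff x 2 (by norm_num)) rfl rfl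
  · exact if_congr (by rw [show ((128:Int) >>> ((Int.toNat (((6:Int),'2').1) : Nat) : Int)) = 2^1 from by decide]; exact bandlow_ne_iff x 1 (by norm_num)) rfl rfl
  · exact if_congr (by rw [show ((128:Int) >>> ((Int.toNat (((7:Int),'1').1) : Nat) : Int)) = 2^0 from by decide]; exact bandlow_ne_iff x 0 (by norm_num)) rfl rfl

lemma hB (x : Int) : repr_prop_alt x = repr_prop_alt (x % 256) := by
  simp only [repr_prop_alt, band255, show (x % 256) % 256 = x % 256 by omega]

set_option maxRecDepth 20000 in
lemma all256 : ∀ n : Nat, n < 256 → repr_prop (n:Int) = repr_prop_alt (n:Int) := by decide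

-- ===== VERDICT (by name: the statement is the Claim_ definition above) =====
theorem repr_prop_spec : Claim_equal_repr_prop := by
  intro x _
  unfold Spec_repr_prop
  rw [hA, hB]
  have h1 : (0:Int) ≤ x % 256 := by omega
  have := all256 (x % 256).toNat (by omega)
  rwa [Int.toNat_of_nonneg h1] at this
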